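-- pv_equiv track=rewrite | github.com/UnrealSSirus/AIRTS | systems/arena.py | _format_match_desc
-- ===== SOURCE A (Python) =====
-- def _format_match_desc(
--     participants: list[tuple[str, int]],
--     ai_names: dict[str, str],
-- ) -> str:
--     """Human-readable match description from participants list."""
--     teams: dict[int, list[str]] = {}
--     for aid, tid in participants:
--         teams.setdefault(tid, []).append(ai_names.get(aid, aid))
--     sorted_teams = sorted(teams.items())
--     if len(sorted_teams) == 2 and all(len(v) == 1 for _, v in sorted_teams):
--         return f"{sorted_teams[0][1][0]} vs {sorted_teams[1][1][0]}"
--     if all(len(v) == 1 for _, v in sorted_teams):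
--         return " | ".join(v[0] for _, v in sorted_teams)
--     return " vs ".join("+".join(v) for _, v in sorted_teams)
-- ===== SOURCE B (Python) =====
-- def _format_match_desc(participants, ai_names):
--     """Human-readable match description from participants list."""
--     tids = sorted({tid for _, tid in participants})
--     groups = [[ai_names.get(aid, aid) for aid, t in participants if t == tid]
--               for tid in tids]
--     if all(len(g) == 1 for g in groups):
--         if len(groups) == 2:
--             return f"{groups[0][0]} vs {groups[1][0]}"
--         return " | ".join(g[0] for g in groups)
--     return " vs ".join("+".join(g) for g in groups)
-- ===== Notes on version B (the rewrite author's own statement) =====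
-- stated objective: alternative
-- what changed: B drops A's dict-grouping + sorted(items) entirely: it sorts the set of team ids and builds each team's name list by a filter comprehension over the participants, and restructures the output branches (all-singleton test first, then the two-team case).
import Mathlib
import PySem

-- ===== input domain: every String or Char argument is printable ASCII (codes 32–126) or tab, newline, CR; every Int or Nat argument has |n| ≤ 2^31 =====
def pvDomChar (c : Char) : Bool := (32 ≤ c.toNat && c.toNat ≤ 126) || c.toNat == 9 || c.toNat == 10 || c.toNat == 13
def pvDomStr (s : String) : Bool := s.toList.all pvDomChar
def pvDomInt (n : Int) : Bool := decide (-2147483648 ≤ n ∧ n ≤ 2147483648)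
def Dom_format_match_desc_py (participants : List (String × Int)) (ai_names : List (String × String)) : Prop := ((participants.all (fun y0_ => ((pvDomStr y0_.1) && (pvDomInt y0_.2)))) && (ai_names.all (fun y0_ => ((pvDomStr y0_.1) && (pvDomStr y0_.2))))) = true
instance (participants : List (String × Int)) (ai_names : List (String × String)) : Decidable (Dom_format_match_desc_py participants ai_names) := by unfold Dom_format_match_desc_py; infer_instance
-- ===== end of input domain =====

-- B replaces A's dict-grouping + sorted(items) with sorted(set(team ids)) followed by one
-- filter pass per team id collecting that team's names (objective: alternative).


-- ===== PORT A =====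
-- A: teams.setdefault(tid, []).append(ai_names.get(aid, aid)) == d[tid] = d.get(tid, []) + [name]
-- (Dict.modify); sorted(teams.items()) compares (key, value) tuples, but dict keys are
-- distinct, so it is exactly the sort by the key component.
def format_match_desc_py (participants : List (String × Int)) (ai_names : List (String × String)) : String :=
  let teams : PySem.Dict Int (List String) :=
    participants.foldl (fun d p =>
      d.modify p.2 [] (fun v => v ++
        [match ai_names.find? (fun q => q.1 == p.1) with
         | some q => q.2
         | none => p.1])) PySem.Dict.empty
  let st := PySem.List.sorted teams.items (fun q => q.1)
  if st.length == 2 && st.all (fun q => q.2.length == 1) then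
    (PySem.List.pyGetD (PySem.List.pyGetD st 0 ((0 : Int), ([] : List String))).2 0 "") ++ " vs " ++
      (PySem.List.pyGetD (PySem.List.pyGetD st 1 ((0 : Int), ([] : List String))).2 0 "")
  else if st.all (fun q => q.2.length == 1) then
    PySem.Str.join " | " (st.map (fun q => PySem.List.pyGetD q.2 0 ""))
  else
    PySem.Str.join " vs " (st.map (fun q => PySem.Str.join "+" q.2))

-- ===== PORT B =====
-- B: sorted set of team ids, then a filter per team id (order inside a team = input order).
def format_match_desc_py_alt (participants : List (String × Int)) (ai_names : List (String × String)) : String :=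
  let tids := PySem.List.sorted (PySem.Set.ofList (participants.map (fun p => p.2))) (fun t => t)
  let groups := tids.map (fun tid =>
    (participants.filter (fun p => p.2 == tid)).map
      (fun p => (((ai_names.find? (fun q => q.1 == p.1)).map (fun q => q.2)).getD p.1)))
  if groups.all (fun g => g.length == 1) then
    if groups.length == 2 then
      (PySem.List.pyGetD (PySem.List.pyGetD groups 0 ([] : List String)) 0 "") ++ " vs " ++
        (PySem.List.pyGetD (PySem.List.pyGetD groups 1 ([] : List String)) 0 "")
    else
      PySem.Str.join " | " (groups.map (fun g => PySem.List.pyGetD g 0 ""))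
  else
    PySem.Str.join " vs " (groups.map (fun g => PySem.Str.join "+" g))

-- ===== PRECONDITION & SPEC =====
def Spec_format_match_desc_py (participants : List (String × Int)) (ai_names : List (String × String)) (out : String) : Prop := out = format_match_desc_py_alt participants ai_names
instance (participants : List (String × Int)) (ai_names : List (String × String)) (out : String) : Decidable (Spec_format_match_desc_py participants ai_names out) := by unfold Spec_format_match_desc_py; infer_instance

-- ===== CLAIM =====
def Claim_equal_format_match_desc_py : Prop := ∀ (participants : List (String × Int)) (ai_names : List (String × String)), Dom_format_match_desc_py participants ai_names → Spec_format_match_desc_py participants ai_names (format_match_desc_py participants ai_names)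

-- ===== LEMMAS AND PROOFS =====

-- the lookup 'ai_names.get(aid, aid)' as the two ports write it, shown equal
lemma pv_name_eq (ai_names : List (String × String)) (aid : String) :
    (match ai_names.find? (fun q => q.1 == aid) with
     | some q => q.2
     | none => aid)
      = (((ai_names.find? (fun q => q.1 == aid)).map (fun q => q.2)).getD aid) := by
  cases ai_names.find? (fun q => q.1 == aid) <;> rfl

-- A's dict after the loop: its value at t is the t-team's names, its keys are the
-- first-occurrence dedup of the team ids
lemma pv_dict_getD (participants : List (String × Int)) (nm : String × Int → String) (t : Int) :
    (participants.foldl (fun d p => d.modify p.2 [] (fun v => v ++ [nm p]))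
        PySem.Dict.empty).getD t []
      = (participants.filter (fun p => p.2 == t)).map nm := by
  have hfold : participants.foldl (fun d p => d.modify p.2 [] (fun v => v ++ [nm p]))
      PySem.Dict.empty
      = (participants.map (fun p => ((p.2 : Int), nm p))).foldl
          (fun d q => d.modify q.1 [] (fun v => v ++ [q.2])) PySem.Dict.empty := by
    rw [List.foldl_map]
  rw [hfold, PySem.Dict.getD_foldl_modify_append]
  simp [List.filter_map, List.map_map, Function.comp_def]

lemma pv_dict_keys (participants : List (String × Int)) (nm : String × Int → String) :
    (participants.foldl (fun d p => d.modify p.2 [] (fun v => v ++ [nm p]))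
        PySem.Dict.empty).keys
      = PySem.List.dedup (participants.map (fun p => p.2)) := by
  rw [PySem.Dict.keys_foldl_modify_key participants (fun p => p.2) []
    (fun _ p => fun v => v ++ [nm p]) PySem.Dict.empty]
  rfl

lemma pv_items_eq (participants : List (String × Int)) (nm : String × Int → String) :
    (participants.foldl (fun d p => d.modify p.2 [] (fun v => v ++ [nm p]))
        PySem.Dict.empty).items
      = (PySem.List.dedup (participants.map (fun p => p.2))).map
          (fun t => (t, (participants.filter (fun p => p.2 == t)).map nm)) := by
  have hnd : (participants.foldl (fun d p => d.modify p.2 [] (fun v => v ++ [nm p]))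
      PySem.Dict.empty).keys.Nodup := by
    rw [pv_dict_keys]; exact PySem.List.nodup_dedup _
  rw [PySem.Dict.items_eq_map_keys _ hnd []]
  rw [pv_dict_keys]
  apply List.map_congr_left
  intro t _
  rw [pv_dict_getD]

-- the central fact: A's sorted dict items are B's sorted team ids, paired with their groups
lemma pv_sorted_items (participants : List (String × Int)) (nm : String × Int → String) :
    PySem.List.sorted
        (participants.foldl (fun d p => d.modify p.2 [] (fun v => v ++ [nm p]))
          PySem.Dict.empty).items (fun q => q.1)
      = (PySem.List.sorted (PySem.Set.ofList (participants.map (fun p => p.2)))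
          (fun t => t)).map
          (fun t => (t, (participants.filter (fun p => p.2 == t)).map nm)) := by
  rw [pv_items_eq, PySem.List.dedup_eq_ofList]
  apply PySem.List.sorted_eq_of_perm_of_pairwise_lt
  · exact (PySem.List.sorted_perm _ _ false).map _
  · apply List.pairwise_map.mpr
    have := PySem.List.sorted_ofList_pairwise_lt (participants.map (fun p => p.2))
    exact this.imp (fun hab => hab)

-- the two renderings agree once the pair list is the map of the group list
lemma pv_render_eq (K : List Int) (f : Int → List String) :
    (if (K.map (fun t => (t, f t))).length == 2 && (K.map (fun t => (t, f t))).all (fun q => q.2.length == 1) then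
       (PySem.List.pyGetD (PySem.List.pyGetD (K.map (fun t => (t, f t))) 0 ((0 : Int), ([] : List String))).2 0 "") ++ " vs " ++
         (PySem.List.pyGetD (PySem.List.pyGetD (K.map (fun t => (t, f t))) 1 ((0 : Int), ([] : List String))).2 0 "")
     else if (K.map (fun t => (t, f t))).all (fun q => q.2.length == 1) then
       PySem.Str.join " | " ((K.map (fun t => (t, f t))).map (fun q => PySem.List.pyGetD q.2 0 ""))
     else
       PySem.Str.join " vs " ((K.map (fun t => (t, f t))).map (fun q => PySem.Str.join "+" q.2)))
      = (if (K.map f).all (fun g => g.length == 1) then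
           if (K.map f).length == 2 then
             (PySem.List.pyGetD (PySem.List.pyGetD (K.map f) 0 ([] : List String)) 0 "") ++ " vs " ++
               (PySem.List.pyGetD (PySem.List.pyGetD (K.map f) 1 ([] : List String)) 0 "")
           else
             PySem.Str.join " | " ((K.map f).map (fun g => PySem.List.pyGetD g 0 ""))
         else
           PySem.Str.join " vs " ((K.map f).map (fun g => PySem.Str.join "+" g))) := by
  have hall : (K.map (fun t => (t, f t))).all (fun q => q.2.length == 1)
      = (K.map f).all (fun g => g.length == 1) := by
    simp [List.all_map, Function.comp_def]
  by_cases ha : (K.map f).all (fun g => g.length == 1) = true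
  · by_cases h2 : K.length = 2
    · obtain ⟨a, b, rfl⟩ := List.length_eq_two.mp h2
      simp [PySem.List.pyGetD]
      split_ifs <;> rfl
    · have : ((K.map (fun t => (t, f t))).length == 2) = false := by simp [h2]
      have h2' : ((K.map f).length == 2) = false := by simp [h2]
      simp [h2, hall, ha, List.map_map, Function.comp_def]
  · have ha' : (K.map f).all (fun g => g.length == 1) = false := by simpa using ha
    simp [hall, ha', List.map_map, Function.comp_def]

-- ===== VERDICT =====
theorem format_match_desc_py_spec : Claim_equal_format_match_desc_py := by
  intro participants ai_names _
  unfold Spec_format_match_desc_py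
  show (let teams : PySem.Dict Int (List String) :=
          participants.foldl (fun d p =>
            d.modify p.2 [] (fun v => v ++
              [match ai_names.find? (fun q => q.1 == p.1) with
               | some q => q.2
               | none => p.1])) PySem.Dict.empty
        let st := PySem.List.sorted teams.items (fun q => q.1)
        if st.length == 2 && st.all (fun q => q.2.length == 1) then
          (PySem.List.pyGetD (PySem.List.pyGetD st 0 ((0 : Int), ([] : List String))).2 0 "") ++ " vs " ++
            (PySem.List.pyGetD (PySem.List.pyGetD st 1 ((0 : Int), ([] : List String))).2 0 "")
        else if st.all (fun q => q.2.length == 1) then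
          PySem.Str.join " | " (st.map (fun q => PySem.List.pyGetD q.2 0 ""))
        else
          PySem.Str.join " vs " (st.map (fun q => PySem.Str.join "+" q.2))) = _
  simp only []
  rw [pv_sorted_items participants (fun p =>
    match ai_names.find? (fun q => q.1 == p.1) with
    | some q => q.2
    | none => p.1)]
  have hf : (fun t => (t, (participants.filter (fun p => p.2 == t)).map (fun p =>
      match ai_names.find? (fun q => q.1 == p.1) with
      | some q => q.2
      | none => p.1)))
      = (fun t => (t, (participants.filter (fun p => p.2 == t)).map (fun p =>
          (((ai_names.find? (fun q => q.1 == p.1)).map (fun q => q.2)).getD p.1)))) := by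
    funext t
    simp only [pv_name_eq]
  rw [hf]
  exact pv_render_eq _ _
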